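-- pv_equiv track=rewrite | github.com/Johnxjp/coding-problems | topcoder/BeautifulBanknotes.py | is_tolerable
-- ===== SOURCE A (Python) =====
-- def is_tolerable(notes: list[int]) -> bool:
--     """
--     If the notes are stunning or tolerable.
--     If at most no notes should be changed
--     """
--     count = 0
--     min_val = notes[0]
--     for i in notes[1:]:
--         if i > min_val:
--             count += 1
--         else:
--             min_val = min(i, min_val)
--
--         if count > 1:
--             return False
--     return True
-- ===== SOURCE B (Python) =====
-- def is_tolerable(notes: list[int]) -> bool:
--     # Build the prefix-minimum table, then count positions whose note exceeds
--     # the minimum of everything before them; tolerable iff at most one such.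
--     mins = [notes[0]]
--     for x in notes[1:]:
--         mins.append(min(mins[-1], x))
--     violations = sum(1 for prev_min, x in zip(mins, notes[1:]) if x > prev_min)
--     return violations <= 1
-- ===== Notes on version B (the rewrite author's own statement) =====
-- stated objective: alternative
-- what changed: B replaces A's single stateful early-exit scan (running min + counter + mid-loop return) by a two-phase table decomposition: first build the prefix-minimum list, then a separate pass counts positions exceeding the previous prefix minimum and compares the count to 1.
import Mathlib
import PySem

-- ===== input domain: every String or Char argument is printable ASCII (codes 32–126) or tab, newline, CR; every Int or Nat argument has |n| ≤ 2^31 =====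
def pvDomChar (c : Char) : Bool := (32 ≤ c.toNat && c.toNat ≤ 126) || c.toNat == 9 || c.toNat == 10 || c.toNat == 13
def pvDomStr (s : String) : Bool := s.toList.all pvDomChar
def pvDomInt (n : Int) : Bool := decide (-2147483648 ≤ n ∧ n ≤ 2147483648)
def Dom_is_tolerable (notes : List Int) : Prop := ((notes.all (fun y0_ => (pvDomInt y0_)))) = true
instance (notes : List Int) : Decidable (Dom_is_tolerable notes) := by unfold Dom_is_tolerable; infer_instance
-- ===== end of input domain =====

-- B replaces A's stateful early-exit scan by a prefix-minimum table plus a counting pass (alternative decomposition, same cost); both raise IndexError on [], excluded by Pre_.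


-- ===== PORT A =====
-- the for-loop over notes[1:] with state (min_val, count) and the early `return False`
def pvLoopA (minv count : Int) : List Int → Bool
  | [] => true
  | i :: rest =>
    if i > minv then
      (if count + 1 > 1 then false else pvLoopA minv (count + 1) rest)
    else
      (if count > 1 then false else pvLoopA (min i minv) count rest)

def is_tolerable (notes : List Int) : Bool :=
  match notes with
  | [] => false            -- notes[0] raises IndexError in Python; excluded by Pre_
  | m0 :: rest => pvLoopA m0 0 rest   -- min_val = notes[0]; loop over notes[1:]

-- ===== PORT B =====
-- mins starts [notes[0]]; each step appends min(mins[-1], x)  (mins is never empty)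
def pvBuildMins (mins : List Int) (rest : List Int) : List Int :=
  rest.foldl (fun mins x => mins ++ [min mins.getLast! x]) mins

def is_tolerable_alt (notes : List Int) : Bool :=
  match notes with
  | [] => false            -- notes[0] raises IndexError in Python; excluded by Pre_
  | m0 :: rest =>
    let mins := pvBuildMins [m0] rest
    let violations := (mins.zip rest).foldl (fun c p => if p.2 > p.1 then c + 1 else c) (0 : Int)
    violations ≤ 1

-- ===== PRECONDITION & SPEC =====
-- A (and B) index notes[0], raising IndexError on the empty list: Pre_ excludes exactly [].
def Pre_is_tolerable (notes : List Int) : Prop := notes ≠ []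
instance (notes : List Int) : Decidable (Pre_is_tolerable notes) := by unfold Pre_is_tolerable; infer_instance
def pvWitness_is_tolerable : List Int := [3, 1, 2]

def Spec_is_tolerable (notes : List Int) (out : Bool) : Prop := out = is_tolerable_alt notes
instance (notes : List Int) (out : Bool) : Decidable (Spec_is_tolerable notes out) := by unfold Spec_is_tolerable; infer_instance

-- ===== CLAIM (what is proved, stated in full; the proofs are below) =====
def Claim_equal_is_tolerable : Prop := ∀ (notes : List Int), Dom_is_tolerable notes → Pre_is_tolerable notes → Spec_is_tolerable notes (is_tolerable notes)

-- ===== LEMMAS AND PROOFS =====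

-- number of "violations" (x strictly above the running minimum), as a Nat
def pvViol (minv : Int) : List Int → Nat
  | [] => 0
  | x :: rest => if x > minv then 1 + pvViol minv rest else pvViol (min x minv) rest

-- the prefix-minimum list, recursively
def pvMinsRec (m : Int) : List Int → List Int
  | [] => [m]
  | x :: rest => m :: pvMinsRec (min m x) rest

theorem pvLoopA_eq (rest : List Int) : ∀ (minv count : Int), count ≤ 1 →
    pvLoopA minv count rest = decide (count + (pvViol minv rest : Int) ≤ 1) := by
  induction rest with
  | nil => intro minv count hc; simp [pvLoopA, pvViol]; omega
  | cons x r ih =>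
    intro minv count hc
    simp only [pvLoopA, pvViol]
    by_cases h : x > minv
    · simp only [h, if_pos]
      by_cases h2 : count + 1 > 1
      · rw [if_pos h2]
        have hv := Int.natCast_nonneg (pvViol minv r)
        symm
        simp only [decide_eq_false_iff_not]
        push_cast
        omega
      · rw [if_neg h2, ih minv (count + 1) (by omega)]
        congr 1
        push_cast
        rw [Int.add_assoc]
    · simp only [h, if_false]
      rw [if_neg (by omega : ¬ count > 1), ih (min x minv) count hc]

theorem pvBuildMins_eq (rest : List Int) : ∀ (pre : List Int) (m : Int),
    pvBuildMins (pre ++ [m]) rest = pre ++ pvMinsRec m rest := by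
  induction rest with
  | nil => intro pre m; simp [pvBuildMins, pvMinsRec]
  | cons x r ih =>
    intro pre m
    have hl : (pre ++ [m]).getLast! = m := by
      rw [List.getLast!_eq_getLast?_getD, List.getLast?_append]; simp
    simp only [pvBuildMins, List.foldl_cons, hl]
    have h2 := ih (pre ++ [m]) (min m x)
    simp only [pvBuildMins] at h2
    rw [h2]
    simp [pvMinsRec]

theorem pvZipCount_eq (rest : List Int) : ∀ (m : Int) (c : Int),
    ((pvMinsRec m rest).zip rest).foldl (fun c p => if p.2 > p.1 then c + 1 else c) c
      = c + (pvViol m rest : Int) := by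
  induction rest with
  | nil => intro m c; simp [pvMinsRec, pvViol]
  | cons x r ih =>
    intro m c
    simp only [pvMinsRec, pvViol, List.zip_cons_cons, List.foldl_cons]
    by_cases h : x > m
    · have hmin : min m x = m := by omega
      have hmin2 : min x m = m := by omega
      simp only [h, if_pos, hmin]
      rw [ih]
      push_cast; omega
    · have hmin : min m x = min x m := by omega
      simp only [h, if_false, hmin]
      exact ih (min x m) c

-- ===== VERDICT (by name: the statement is the Claim_ definition above) =====
theorem is_tolerable_spec : Claim_equal_is_tolerable := by
  intro notes _ hpre
  unfold Spec_is_tolerable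
  match notes with
  | [] => exact absurd rfl hpre
  | m0 :: rest =>
    simp only [is_tolerable, is_tolerable_alt]
    have hb : pvBuildMins [m0] rest = pvMinsRec m0 rest := by
      have := pvBuildMins_eq rest [] m0
      simpa using this
    rw [pvLoopA_eq rest m0 0 (by omega), hb, pvZipCount_eq]
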